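-- pv_equiv track=rewrite | github.com/ddunnock/convergence-os | services/ml/src/convergence_ml/utils/text_preprocessing.py | _create_overlap_chunk
-- ===== SOURCE A (Python) =====
-- def _create_overlap_chunk(current_chunk: list[str], overlap: int) -> tuple[list[str], int]:
--     """Create overlap chunk from previous sentences.
--
--     Args:
--         current_chunk: Previous chunk sentences.
--         overlap: Overlap size in words.
--
--     Returns:
--         Tuple of (overlap_sentences, overlap_word_count).
--     """
--     overlap_words = 0
--     overlap_sentences: list[str] = []
--
--     for sentence in reversed(current_chunk):
--         sentence_word_count = len(sentence.split())
--         if overlap_words + sentence_word_count <= overlap: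
--             overlap_sentences.insert(0, sentence)
--             overlap_words += sentence_word_count
--         else:
--             break
--
--     return overlap_sentences, overlap_words
-- ===== SOURCE B (Python) =====
-- def _create_overlap_chunk(current_chunk: list[str], overlap: int) -> tuple[list[str], int]:
--     """Binary-search variant: precompute suffix word-count sums, then find the
--     largest number m of trailing sentences fitting in the overlap budget."""
--     # sums[j] = total words of the last j+1 sentences
--     sums = []
--     total = 0
--     for sentence in reversed(current_chunk):
--         total += len(sentence.split())
--         sums.append(total)
--     # sums is nondecreasing; find first index whose sum exceeds overlap
--     lo, hi = 0, len(sums)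
--     while lo < hi:
--         mid = (lo + hi) // 2
--         if sums[mid] <= overlap:
--             lo = mid + 1
--         else:
--             hi = mid
--     m = lo
--     return current_chunk[len(current_chunk) - m:], (sums[m - 1] if m > 0 else 0)
-- ===== Notes on version B (the rewrite author's own statement) =====
-- stated objective: faster
-- what changed: A scans the reversed chunk accumulating words, prepending each kept sentence with list.insert(0,...) and breaking at the first overflow; B precomputes the monotone suffix word-count sums in one pass, binary-searches that table for the largest fitting tail, and returns one slice plus a table lookup.
import Mathlib
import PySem

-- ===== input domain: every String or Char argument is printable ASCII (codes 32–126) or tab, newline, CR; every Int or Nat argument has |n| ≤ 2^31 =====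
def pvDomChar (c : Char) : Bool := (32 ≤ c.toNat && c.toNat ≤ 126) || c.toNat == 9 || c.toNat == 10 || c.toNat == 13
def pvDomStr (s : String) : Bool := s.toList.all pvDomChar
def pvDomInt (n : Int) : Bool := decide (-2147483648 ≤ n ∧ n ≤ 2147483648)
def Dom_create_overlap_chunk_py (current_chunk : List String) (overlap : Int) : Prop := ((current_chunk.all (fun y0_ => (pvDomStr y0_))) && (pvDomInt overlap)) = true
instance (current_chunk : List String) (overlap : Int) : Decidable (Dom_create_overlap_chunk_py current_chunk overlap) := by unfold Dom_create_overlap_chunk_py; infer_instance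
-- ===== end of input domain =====

-- B replaces A's reverse scan-with-break (which rebuilds the result via insert(0,...)) by a
-- precomputed suffix-sum table, a binary search for the largest fitting tail, and one slice
-- (objective: faster, measured).

-- ===== PORT A =====
-- len(sentence.split())
def pvWc (s : String) : Int := ((PySem.Str.split₀ s).length : Int)

-- 'for sentence in reversed(current_chunk): … else: break' as structural recursion;
-- state = (overlap_sentences, overlap_words); insert(0, s) = s :: acc
def pvALoop (overlap : Int) : List String → List String → Int → List String × Int
  | [], acc, w => (acc, w)
  | s :: rest, acc, w =>
    let c := pvWc s
    if w + c ≤ overlap then pvALoop overlap rest (s :: acc) (w + c)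
    else (acc, w)

def create_overlap_chunk_py (current_chunk : List String) (overlap : Int) : List String × Int :=
  pvALoop overlap current_chunk.reverse [] 0

-- ===== PORT B =====
-- the suffix-sum building loop of Source B: state = (sums, total)
def pvBSums (current_chunk : List String) : List Int × Int :=
  current_chunk.reverse.foldl (fun st s => (st.1 ++ [st.2 + pvWc s], st.2 + pvWc s)) ([], 0)

-- the while-loop binary search of Source B; sums[mid] is always in range, ported as pyGetD
def pvBisect (sums : List Int) (overlap : Int) (lo hi : Int) : Int :=
  if h : lo < hi then
    let mid := PySem.Int.floordiv (lo + hi) 2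
    if PySem.List.pyGetD sums mid 0 ≤ overlap then pvBisect sums overlap (mid + 1) hi
    else pvBisect sums overlap lo mid
  else lo
termination_by (hi - lo).toNat
decreasing_by
  · have h1 : lo ≤ PySem.Int.floordiv (lo + hi) 2 :=
      (PySem.Int.floordiv_two_mid_bounds (le_of_lt h)).1
    have h2 : PySem.Int.floordiv (lo + hi) 2 < hi :=
      (PySem.Int.floordiv_lt_iff_lt_mul (by norm_num)).mpr (by omega)
    omega
  · have h2 : PySem.Int.floordiv (lo + hi) 2 < hi :=
      (PySem.Int.floordiv_lt_iff_lt_mul (by norm_num)).mpr (by omega)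
    omega

def create_overlap_chunk_py_alt (current_chunk : List String) (overlap : Int) : List String × Int :=
  let sums := (pvBSums current_chunk).1
  let m := pvBisect sums overlap 0 (sums.length : Int)
  (PySem.List.slice current_chunk (some ((current_chunk.length : Int) - m)) none,
   if 0 < m then PySem.List.pyGetD sums (m - 1) 0 else 0)

-- ===== PRECONDITION & SPEC =====
def Spec_create_overlap_chunk_py (current_chunk : List String) (overlap : Int) (out : List String × Int) : Prop := out = create_overlap_chunk_py_alt current_chunk overlap
instance (current_chunk : List String) (overlap : Int) (out : List String × Int) : Decidable (Spec_create_overlap_chunk_py current_chunk overlap out) := by unfold Spec_create_overlap_chunk_py; infer_instance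

-- ===== CLAIM (what is proved, stated in full; the proofs are below) =====
def Claim_equal_create_overlap_chunk_py : Prop := ∀ (current_chunk : List String) (overlap : Int), Dom_create_overlap_chunk_py current_chunk overlap → Spec_create_overlap_chunk_py current_chunk overlap (create_overlap_chunk_py current_chunk overlap)

-- ===== LEMMAS AND PROOFS =====

-- prefix sums of a count list starting from t (proof-side model of Source B's sums table)
def pvPS (cs : List Int) (t : Int) : List Int :=
  match cs with
  | [] => []
  | c :: cs' => (t + c) :: pvPS cs' (t + c)

-- number of sentences A takes (proof-side model of A's loop)
def pvTC (overlap : Int) : List String → Int → Nat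
  | [], _ => 0
  | s :: rest, w => if w + pvWc s ≤ overlap then pvTC overlap rest (w + pvWc s) + 1 else 0

theorem pvPS_length (cs : List Int) (t : Int) : (pvPS cs t).length = cs.length := by
  induction cs generalizing t with
  | nil => rfl
  | cons c cs ih => simp [pvPS, ih]

theorem pvPS_get (cs : List Int) (t : Int) (i : Nat) (h : i < (pvPS cs t).length) :
    (pvPS cs t)[i] = t + (cs.take (i + 1)).sum := by
  induction cs generalizing t i with
  | nil => simp [pvPS] at h
  | cons c cs ih =>
    cases i with
    | zero => simp [pvPS]
    | succ j =>
      have h' : j < (pvPS cs (t + c)).length := by simpa [pvPS] using h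
      show (pvPS cs (t + c))[j] = _
      rw [ih (t + c) j h']
      simp [List.take]
      ring

theorem pvSum_take_mono (cs : List Int) (hnn : ∀ c ∈ cs, 0 ≤ c) (a b : Nat) (hab : a ≤ b) :
    (cs.take a).sum ≤ (cs.take b).sum := by
  induction cs generalizing a b with
  | nil => simp
  | cons c cs ih =>
    have hc : 0 ≤ c := hnn c List.mem_cons_self
    have hnn' : ∀ x ∈ cs, 0 ≤ x := fun x hx => hnn x (List.mem_cons_of_mem _ hx)
    cases a with
    | zero =>
      have h0 : (0:Int) ≤ (cs.take (b-1)).sum := by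
        have := ih hnn' 0 (b-1) (Nat.zero_le _)
        simpa using this
      cases b with
      | zero => simp
      | succ b' =>
        simp only [List.take_zero, List.sum_nil, List.take_succ_cons, List.sum_cons]
        have := ih hnn' 0 b' (Nat.zero_le _)
        simp at this
        omega
    | succ a' =>
      cases b with
      | zero => omega
      | succ b' =>
        have := ih hnn' a' b' (by omega)
        simp only [List.take_succ_cons, List.sum_cons]
        omega

-- A's loop in closed form
theorem pvALoop_eq (overlap : Int) (r : List String) : ∀ (acc : List String) (w : Int),
    pvALoop overlap r acc w =
      ((r.take (pvTC overlap r w)).reverse ++ acc,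
       w + ((r.map pvWc).take (pvTC overlap r w)).sum) := by
  induction r with
  | nil => intro acc w; simp [pvALoop, pvTC]
  | cons s rest ih =>
    intro acc w
    by_cases hc : w + pvWc s ≤ overlap
    · simp only [pvALoop, pvTC, hc, if_pos]
      rw [ih (s :: acc) (w + pvWc s)]
      simp [List.take_succ_cons]
      ring
    · simp [pvALoop, pvTC, hc]

-- A's take count satisfies the bisect characterisation
theorem pvTC_spec (overlap : Int) (r : List String) : ∀ t : Int,
    pvTC overlap r t ≤ r.length ∧
    (∀ i (h : i < (pvPS (r.map pvWc) t).length), i < pvTC overlap r t → (pvPS (r.map pvWc) t)[i] ≤ overlap) ∧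
    (∀ h : pvTC overlap r t < (pvPS (r.map pvWc) t).length,
      overlap < (pvPS (r.map pvWc) t)[pvTC overlap r t]) := by
  induction r with
  | nil => intro t; refine ⟨le_refl _, ?_, ?_⟩ <;> intro i <;> simp [pvPS] at i ⊢
  | cons s rest ih =>
    intro t
    obtain ⟨ihl, ihm, ihh⟩ := ih (t + pvWc s)
    by_cases hc : t + pvWc s ≤ overlap
    · refine ⟨?_, ?_, ?_⟩
      · simp only [pvTC, hc, if_pos, List.length_cons]; omega
      · intro i h hi
        simp only [pvTC, hc, if_pos] at hi
        cases i with
        | zero => simpa [pvPS] using hc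
        | succ j =>
          have h' : j < (pvPS (rest.map pvWc) (t + pvWc s)).length := by
            simpa [pvPS] using h
          exact ihm j h' (by omega)
      · intro h
        simp only [pvTC, hc, if_pos] at h ⊢
        have h' : pvTC overlap rest (t + pvWc s) < (pvPS (rest.map pvWc) (t + pvWc s)).length := by
          simpa [pvPS] using h
        exact ihh h'
    · refine ⟨?_, ?_, ?_⟩ <;> simp only [pvTC, if_neg hc]
      · exact Nat.zero_le _
      · intro i h hi; omega
      · intro h
        simpa [pvPS] using lt_of_not_ge hc

-- correctness of Source B's binary search on a monotone table
theorem pvBisect_spec (sums : List Int) (ov : Int)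
    (mono : ∀ i j (hi : i < sums.length) (hj : j < sums.length), i ≤ j → sums[i] ≤ sums[j]) :
    ∀ lo hi : Int, 0 ≤ lo → lo ≤ hi → hi ≤ (sums.length : Int) →
    (∀ i : Nat, (i : Int) < lo → ∀ h : i < sums.length, sums[i] ≤ ov) →
    (∀ i : Nat, hi ≤ (i : Int) → ∀ h : i < sums.length, ov < sums[i]) →
    lo ≤ pvBisect sums ov lo hi ∧ pvBisect sums ov lo hi ≤ hi ∧
    (∀ i : Nat, (i : Int) < pvBisect sums ov lo hi → ∀ h : i < sums.length, sums[i] ≤ ov) ∧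
    (∀ i : Nat, pvBisect sums ov lo hi ≤ (i : Int) → ∀ h : i < sums.length, ov < sums[i]) := by
  intro lo hi
  induction lo, hi using pvBisect.induct sums ov with
  | case1 lo hi h mid hle ih =>
    intro h0 hlh hhl hlow hhigh
    have hmid1 : lo ≤ mid := (PySem.Int.floordiv_two_mid_bounds (le_of_lt h)).1
    have hmid2 : mid < hi := (PySem.Int.floordiv_lt_iff_lt_mul (by norm_num)).mpr (by omega)
    have hmlen : mid.toNat < sums.length := by omega
    have hmval : sums[mid.toNat] ≤ ov := by
      rw [← PySem.List.pyGetD_eq_getElem sums 0 (by omega) (by omega)]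
      exact hle
    have heq : pvBisect sums ov lo hi = pvBisect sums ov (mid + 1) hi := by
      rw [pvBisect]; simp only [dif_pos h]; exact if_pos hle
    rw [heq]
    have := ih (by omega) (by omega) hhl
      (fun i hi' hlt => le_trans (mono i mid.toNat hlt hmlen (by omega)) hmval)
      hhigh
    exact ⟨by omega, this.2.1, this.2.2.1, this.2.2.2⟩
  | case2 lo hi h mid hgt ih =>
    intro h0 hlh hhl hlow hhigh
    have hmid1 : lo ≤ mid := (PySem.Int.floordiv_two_mid_bounds (le_of_lt h)).1
    have hmid2 : mid < hi := (PySem.Int.floordiv_lt_iff_lt_mul (by norm_num)).mpr (by omega)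
    have hmlen : mid.toNat < sums.length := by omega
    have hmval : ov < sums[mid.toNat] := by
      have := lt_of_not_ge hgt
      rwa [PySem.List.pyGetD_eq_getElem sums 0 (by omega) (by omega)] at this
    have heq : pvBisect sums ov lo hi = pvBisect sums ov lo mid := by
      rw [pvBisect]; simp only [dif_pos h]; exact if_neg hgt
    rw [heq]
    have := ih h0 (by omega) (by omega) hlow
      (fun i hi' hlt => lt_of_lt_of_le hmval (mono mid.toNat i hmlen hlt (by omega)))
    exact ⟨this.1, by omega, this.2.2.1, this.2.2.2⟩
  | case3 lo hi h =>
    intro h0 hlh hhl hlow hhigh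
    have heq : pvBisect sums ov lo hi = lo := by rw [pvBisect]; exact dif_neg h
    rw [heq]
    exact ⟨le_refl _, hlh, hlow, fun i hi' hlt => hhigh i (by omega) hlt⟩

-- Source B's sums loop builds exactly the prefix sums of the reversed word counts
theorem pvBSums_foldl (r : List String) : ∀ (acc : List Int) (t : Int),
    r.foldl (fun st s => (st.1 ++ [st.2 + pvWc s], st.2 + pvWc s)) (acc, t) =
      (acc ++ pvPS (r.map pvWc) t, t + (r.map pvWc).sum) := by
  induction r with
  | nil => intro acc t; simp [pvPS]
  | cons s rest ih =>
    intro acc t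
    simp only [List.foldl_cons, List.map_cons, List.sum_cons, pvPS]
    rw [ih]
    simp
    ring

-- ===== VERDICT (by name: the statement is the Claim_ definition above) =====
theorem create_overlap_chunk_py_spec : Claim_equal_create_overlap_chunk_py := by
  intro cc ov _
  unfold Spec_create_overlap_chunk_py
  have hwc : ∀ s : String, 0 ≤ pvWc s := fun s => Int.natCast_nonneg _
  have hnn : ∀ c ∈ cc.reverse.map pvWc, 0 ≤ c := by
    intro c hc
    obtain ⟨s, _, rfl⟩ := List.mem_map.mp hc
    exact hwc s
  have hlen : (pvPS (cc.reverse.map pvWc) 0).length = cc.length := by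
    simp [pvPS_length]
  have mono : ∀ i j (hi : i < (pvPS (cc.reverse.map pvWc) 0).length)
      (hj : j < (pvPS (cc.reverse.map pvWc) 0).length), i ≤ j →
      (pvPS (cc.reverse.map pvWc) 0)[i] ≤ (pvPS (cc.reverse.map pvWc) 0)[j] := by
    intro i j hi hj hij
    rw [pvPS_get _ _ _ hi, pvPS_get _ _ _ hj]
    have := pvSum_take_mono (cc.reverse.map pvWc) hnn (i + 1) (j + 1) (by omega)
    omega
  obtain ⟨htl, htm, hth⟩ := pvTC_spec ov cc.reverse 0
  have hklen : pvTC ov cc.reverse 0 ≤ cc.length := by simpa using htl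
  obtain ⟨hb1, hb2, hb3, hb4⟩ := pvBisect_spec (pvPS (cc.reverse.map pvWc) 0) ov mono
      0 ((pvPS (cc.reverse.map pvWc) 0).length : Int) (le_refl 0) (by positivity)
      (le_refl _) (by intro i hi' h; omega) (by intro i hi' h; omega)
  set k := pvTC ov cc.reverse 0 with hk
  set m := pvBisect (pvPS (cc.reverse.map pvWc) 0) ov 0 ((pvPS (cc.reverse.map pvWc) 0).length : Int) with hm
  have hmk : m = (k : Int) := by
    rcases lt_trichotomy m (k : Int) with hlt | heq | hgt
    · exfalso
      have hmn : m.toNat < k := by omega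
      have hmlt : m.toNat < (pvPS (cc.reverse.map pvWc) 0).length := by
        rw [hlen]; omega
      have h1 := htm m.toNat hmlt hmn
      have h2 := hb4 m.toNat (by omega) hmlt
      omega
    · exact heq
    · exfalso
      have hklt : k < (pvPS (cc.reverse.map pvWc) 0).length := by rw [hlen]; omega
      have h1 := hth hklt
      have h2 := hb3 k (by omega) hklt
      omega
  have hBS : pvBSums cc = (pvPS (cc.reverse.map pvWc) 0, 0 + (cc.reverse.map pvWc).sum) := by
    unfold pvBSums
    simpa using pvBSums_foldl cc.reverse [] 0
  show pvALoop ov cc.reverse [] 0 = _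
  rw [pvALoop_eq]
  unfold create_overlap_chunk_py_alt
  rw [hBS]
  simp only [← hk, ← hm, hmk]
  refine Prod.ext ?_ ?_
  · show (cc.reverse.take k).reverse ++ [] = PySem.List.slice cc (some ((cc.length : Int) - (k : Int))) none
    have hcast : (cc.length : Int) - (k : Int) = ((cc.length - k : Nat) : Int) := by omega
    rw [hcast, PySem.List.slice_from_natCast]
    simp [List.take_reverse]
  · show 0 + ((cc.reverse.map pvWc).take k).sum =
        if 0 < (k : Int) then PySem.List.pyGetD (pvPS (cc.reverse.map pvWc) 0) ((k : Int) - 1) 0 else 0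
    by_cases hk0 : k = 0
    · simp [hk0]
    · rw [if_pos (by omega)]
      have hidx : k - 1 < (pvPS (cc.reverse.map pvWc) 0).length := by rw [hlen]; omega
      rw [PySem.List.pyGetD_eq_getElem _ 0 (by omega) (by rw [hlen]; omega)]
      have ht : ((k : Int) - 1).toNat = k - 1 := by omega
      simp only [ht]
      rw [pvPS_get (cc.reverse.map pvWc) 0 (k - 1) hidx]
      have hk1 : k - 1 + 1 = k := by omega
      rw [hk1]
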